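-- pv_equiv track=rewrite | github.com/daniel122134/chessBot | backend/src/hal/WizardsChessController.py | combine_movements
-- ===== SOURCE A (Python) =====
-- def square_to_index_tuple(square):
--     return (square // 8, square % 8)
--
-- def combine_movements(movements: list):
--     movs = movements.copy()
--     movs.reverse()
--     movements_in_right_order = list()
--     seen_ids = set()
--
--     # the piece id is the beginning square of the soldier
--     for (mov, piece_id) in movs:
--         if piece_id not in seen_ids:
--             movements_in_right_order.append((square_to_index_tuple(piece_id), mov[1]))
--             seen_ids.add(piece_id)
--
--     movements_in_right_order.reverse()
--
--     return movements_in_right_order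
-- ===== SOURCE B (Python) =====
-- def square_to_index_tuple(square):
--     return (square // 8, square % 8)
--
-- def combine_movements(movements: list):
--     # pass 1: record the last index of each piece_id
--     last_index = {}
--     for i, (mov, piece_id) in enumerate(movements):
--         last_index[piece_id] = i
--     # pass 2: keep exactly the entries sitting at their piece_id's last index
--     return [(square_to_index_tuple(piece_id), mov[1])
--             for i, (mov, piece_id) in enumerate(movements)
--             if last_index[piece_id] == i]
-- ===== Notes on version B (the rewrite author's own statement) =====
-- stated objective: alternative
-- what changed: Replaces the copy/reverse/seen-set/reverse scheme with two staged forward passes: first a dict of each piece_id's last index, then a filter keeping exactly the entries at their last index.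
import Mathlib
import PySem

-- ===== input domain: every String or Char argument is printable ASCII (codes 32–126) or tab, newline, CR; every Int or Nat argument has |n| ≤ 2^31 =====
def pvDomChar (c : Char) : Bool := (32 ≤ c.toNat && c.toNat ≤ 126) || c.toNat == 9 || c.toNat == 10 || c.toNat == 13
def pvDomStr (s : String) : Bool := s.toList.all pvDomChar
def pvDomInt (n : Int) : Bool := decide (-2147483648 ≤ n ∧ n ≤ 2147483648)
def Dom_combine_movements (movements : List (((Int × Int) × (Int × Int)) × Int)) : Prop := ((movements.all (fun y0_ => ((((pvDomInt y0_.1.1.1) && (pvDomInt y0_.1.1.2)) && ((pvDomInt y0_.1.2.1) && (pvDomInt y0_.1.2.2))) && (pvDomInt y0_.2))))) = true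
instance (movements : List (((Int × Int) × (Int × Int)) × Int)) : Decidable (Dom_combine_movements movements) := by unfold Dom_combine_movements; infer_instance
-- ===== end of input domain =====

-- B replaces A's copy/reverse/seen-set/reverse scheme by two staged forward passes:
-- a dict of each piece_id's LAST index, then a filter keeping exactly the entries
-- sitting at their id's last index; same O(n) shape, no reversals.

-- shared same-module helper square_to_index_tuple (used by both Pythons)
def square_to_index_tuple (square : Int) : Int × Int :=
  (PySem.Int.floordiv square 8, PySem.Int.mod square 8)

-- ===== PORT A =====
-- reversed copy; forward loop keeping first occurrence (seen set); reverse the result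
def combine_movements (movements : List (((Int × Int) × (Int × Int)) × Int)) : List ((Int × Int) × (Int × Int)) :=
  let movs := movements.reverse
  let st := movs.foldl
    (fun (st : List ((Int × Int) × (Int × Int)) × PySem.Set Int) x =>
      if st.2.contains x.2 then st
      else (st.1 ++ [(square_to_index_tuple x.2, x.1.2)], st.2.add x.2))
    ([], PySem.Set.empty)
  st.1.reverse

-- ===== PORT B =====
-- pass 1: dict piece_id → last index (enumerate + insert overwrites);
-- pass 2: keep the entries at their id's last index.  Python reads last_index[piece_id],
-- which never raises (pass 1 inserted every id), so getD with any default is exact.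
def combine_movements_alt (movements : List (((Int × Int) × (Int × Int)) × Int)) : List ((Int × Int) × (Int × Int)) :=
  let last_index := (PySem.List.enumerate movements 0).foldl
    (fun (d : PySem.Dict Int Int) ix => d.insert ix.2.2 ix.1) PySem.Dict.empty
  ((PySem.List.enumerate movements 0).filter
      (fun ix => last_index.getD ix.2.2 (-1) == ix.1)).map
    (fun ix => (square_to_index_tuple ix.2.2, ix.2.1.2))

-- ===== PRECONDITION & SPEC =====
def Spec_combine_movements (movements : List (((Int × Int) × (Int × Int)) × Int)) (out : List ((Int × Int) × (Int × Int))) : Prop := out = combine_movements_alt movements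
instance (movements : List (((Int × Int) × (Int × Int)) × Int)) (out : List ((Int × Int) × (Int × Int))) : Decidable (Spec_combine_movements movements out) := by unfold Spec_combine_movements; infer_instance

-- ===== CLAIM (what is proved, stated in full; the proofs are below) =====
def Claim_equal_combine_movements : Prop := ∀ (movements : List (((Int × Int) × (Int × Int)) × Int)), Dom_combine_movements movements → Spec_combine_movements movements (combine_movements movements)

-- ===== LEMMAS AND PROOFS =====

-- common reference function: keep each entry having no later occurrence of its piece_id
def sel : List (((Int × Int) × (Int × Int)) × Int) → List ((Int × Int) × (Int × Int))
  | [] => []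
  | x :: l =>
    if l.any (fun y => y.2 == x.2) then sel l
    else (square_to_index_tuple x.2, x.1.2) :: sel l

-- A-side characterisation: entries whose pid is fresh, first-occurrence order, with key
def hsel : List (((Int × Int) × (Int × Int)) × Int) → List Int → List (Int × ((Int × Int) × (Int × Int)))
  | [], _ => []
  | x :: l, seen =>
    if x.2 ∈ seen then hsel l seen
    else (x.2, (square_to_index_tuple x.2, x.1.2)) :: hsel l (x.2 :: seen)

lemma hsel_congr (l : List (((Int × Int) × (Int × Int)) × Int)) :
    ∀ s1 s2 : List Int, (∀ a, a ∈ s1 ↔ a ∈ s2) → hsel l s1 = hsel l s2 := by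
  induction l with
  | nil => intro s1 s2 _; rfl
  | cons x l ih =>
    intro s1 s2 h
    simp only [hsel]
    by_cases hx : x.2 ∈ s1
    · rw [if_pos hx, if_pos ((h x.2).1 hx), ih s1 s2 h]
    · rw [if_neg hx, if_neg (fun c => hx ((h x.2).2 c))]
      congr 1
      exact ih _ _ (by intro a; simp [h a])

-- A's loop computes hsel (on its reversed input)
lemma loopA_eq (l : List (((Int × Int) × (Int × Int)) × Int)) :
    ∀ (acc : List ((Int × Int) × (Int × Int))) (seen : PySem.Set Int),
      (l.foldl
        (fun (st : List ((Int × Int) × (Int × Int)) × PySem.Set Int) x =>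
          if st.2.contains x.2 then st
          else (st.1 ++ [(square_to_index_tuple x.2, x.1.2)], st.2.add x.2))
        (acc, seen)).1
      = acc ++ (hsel l seen).map Prod.snd := by
  induction l with
  | nil => intro acc seen; simp [hsel]
  | cons x l ih =>
    intro acc seen
    simp only [List.foldl_cons, hsel]
    by_cases hx : x.2 ∈ seen
    · rw [if_pos (by simpa [PySem.Set.contains] using hx), if_pos hx, ih]
    · rw [if_neg (by simpa [PySem.Set.contains] using hx), if_neg hx]
      rw [ih]
      have : hsel l (PySem.Set.add seen x.2) = hsel l (x.2 :: seen) := by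
        apply hsel_congr
        intro a
        simp [PySem.Set.add, PySem.Set.contains, hx]
        tauto
      rw [this]
      simp

-- appending one entry selects it iff its pid is new overall
lemma hsel_append (x : ((Int × Int) × (Int × Int)) × Int) :
    ∀ (m : List (((Int × Int) × (Int × Int)) × Int)) (seen : List Int),
      hsel (m ++ [x]) seen
        = hsel m seen ++
          (if x.2 ∈ seen ∨ x.2 ∈ m.map (·.2) then []
           else [(x.2, (square_to_index_tuple x.2, x.1.2))]) := by
  intro m
  induction m with
  | nil =>
    intro seen
    simp only [List.nil_append, hsel, List.map_nil]
    by_cases h : x.2 ∈ seen <;> simp [h]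
  | cons y m ih =>
    intro seen
    simp only [List.cons_append, hsel, List.map_cons]
    by_cases hy : y.2 ∈ seen
    · rw [if_pos hy, if_pos hy, ih]
      congr 1
      apply if_congr _ rfl rfl
      simp only [List.mem_cons]
      constructor
      · rintro (h | h)
        · exact Or.inl h
        · exact Or.inr (Or.inr h)
      · rintro (h | h | h)
        · exact Or.inl h
        · exact Or.inl (h ▸ hy)
        · exact Or.inr h
    · rw [if_neg hy, if_neg hy, ih]
      simp only [List.cons_append]
      congr 2
      apply if_congr _ rfl rfl
      simp only [List.mem_cons]
      tauto

-- A equals sel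
lemma A_eq_sel (l : List (((Int × Int) × (Int × Int)) × Int)) :
    ((hsel l.reverse []).map Prod.snd).reverse = sel l := by
  induction l with
  | nil => rfl
  | cons x l ih =>
    rw [List.reverse_cons, hsel_append, sel]
    have hmem : (x.2 ∈ ([] : List Int) ∨ x.2 ∈ l.reverse.map (·.2))
        ↔ (l.any (fun y => y.2 == x.2) = true) := by
      simp only [List.not_mem_nil, false_or, List.mem_map, List.mem_reverse,
        List.any_eq_true, beq_iff_eq]
    by_cases h : l.any (fun y => y.2 == x.2)
    · rw [if_pos (hmem.2 h), if_pos h, ← ih]; simp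
    · rw [if_neg (fun c => h (hmem.1 c)), if_neg h, ← ih]; simp

-- B-side characterisation: last index of a pid, counting from n
def lastIdx (n : Int) : List (((Int × Int) × (Int × Int)) × Int) → Int → Option Int
  | [], _ => none
  | x :: l, p => (lastIdx (n + 1) l p).or (if x.2 = p then some n else none)

lemma lastIdx_none (p : Int) :
    ∀ (l : List (((Int × Int) × (Int × Int)) × Int)) (n : Int),
      lastIdx n l p = none ↔ (l.any (fun y => y.2 == p) = false) := by
  intro l
  induction l with
  | nil => intro n; simp [lastIdx]
  | cons x l ih =>
    intro n
    simp only [lastIdx, List.any_cons, Option.or_eq_none_iff, ih (n + 1),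
      Bool.or_eq_false_iff, beq_eq_false_iff_ne, ne_eq]
    by_cases hx : x.2 = p <;> simp [hx]

lemma lastIdx_lb (p : Int) :
    ∀ (l : List (((Int × Int) × (Int × Int)) × Int)) (n i : Int),
      lastIdx n l p = some i → n ≤ i := by
  intro l
  induction l with
  | nil => intro n i h; simp [lastIdx] at h
  | cons x l ih =>
    intro n i h
    simp only [lastIdx] at h
    rcases hm : lastIdx (n + 1) l p with _ | j
    · rw [hm, Option.none_or] at h
      by_cases hx : x.2 = p
      · rw [if_pos hx] at h
        cases h; omega
      · rw [if_neg hx] at h; simp at h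
    · rw [hm, Option.some_or] at h
      cases h
      have := ih (n + 1) i hm
      omega

-- the dict of pass 1 computes lastIdx
lemma dictB (p : Int) :
    ∀ (l : List (((Int × Int) × (Int × Int)) × Int)) (n : Int) (d : PySem.Dict Int Int),
      ((PySem.List.enumerate l n).foldl
          (fun (d : PySem.Dict Int Int) ix => d.insert ix.2.2 ix.1) d).get? p
        = (lastIdx n l p).or (d.get? p) := by
  intro l
  induction l with
  | nil => intro n d; simp [PySem.List.enumerate_nil, lastIdx]
  | cons x l ih =>
    intro n d
    rw [PySem.List.enumerate_cons, List.foldl_cons, ih]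
    simp only [lastIdx, Option.or_assoc]
    congr 1
    rw [PySem.Dict.get?_insert]
    by_cases hx : x.2 = p
    · rw [if_pos hx, if_pos hx.symm, Option.some_or]
    · rw [if_neg hx, if_neg (fun c => hx c.symm), Option.none_or]

-- pass 2 with lastIdx as the test computes sel
lemma B_eq_sel :
    ∀ (l : List (((Int × Int) × (Int × Int)) × Int)) (n : Int),
      ((PySem.List.enumerate l n).filter
          (fun ix => (lastIdx n l ix.2.2).getD (-1) == ix.1)).map
        (fun ix => (square_to_index_tuple ix.2.2, ix.2.1.2))
      = sel l := by
  intro l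
  induction l with
  | nil => intro n; simp [PySem.List.enumerate_nil, sel]
  | cons x l ih =>
    intro n
    rw [PySem.List.enumerate_cons, List.filter_cons, sel]
    have htail :
        (PySem.List.enumerate l (n + 1)).filter
            (fun ix => (lastIdx n (x :: l) ix.2.2).getD (-1) == ix.1)
          = (PySem.List.enumerate l (n + 1)).filter
            (fun ix => (lastIdx (n + 1) l ix.2.2).getD (-1) == ix.1) := by
      apply List.filter_congr
      intro ix hix
      have hmem : ix.2 ∈ l := by
        rcases (PySem.List.mem_enumerate_iff l (n + 1) ix).1 hix with ⟨k, hk, rfl⟩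
        exact List.getElem_mem hk
      have hany : l.any (fun y => y.2 == ix.2.2) = true := by
        simp only [List.any_eq_true]
        exact ⟨ix.2, hmem, by simp⟩
      rcases hm : lastIdx (n + 1) l ix.2.2 with _ | i
      · rw [(lastIdx_none _ _ _).1 hm] at hany; exact absurd hany (by simp)
      · simp only [lastIdx, hm, Option.some_or]
    by_cases h : l.any (fun y => y.2 == x.2)
    · have hne : lastIdx (n + 1) l x.2 ≠ none := by
        intro c; rw [(lastIdx_none _ _ _).1 c] at h; exact absurd h (by simp)
      rcases hm : lastIdx (n + 1) l x.2 with _ | i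
      · exact absurd hm hne
      · have hi : n + 1 ≤ i := lastIdx_lb _ _ _ _ hm
        rw [if_neg (by simp only [lastIdx, hm, Option.some_or, Option.getD_some]; simp; omega),
          if_pos h, htail, ih]
    · have hm : lastIdx (n + 1) l x.2 = none := (lastIdx_none _ _ _).2 (by rw [Bool.eq_false_iff]; exact h)
      rw [if_pos (by simp only [lastIdx, hm, Option.none_or]; simp),
        if_neg h, htail, List.map_cons, ih]

-- ===== VERDICT (by name: the statement is the Claim_ definition above) =====
theorem combine_movements_spec : Claim_equal_combine_movements := by
  intro movements _
  unfold Spec_combine_movements combine_movements combine_movements_alt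
  simp only
  rw [loopA_eq]
  have hA : ((hsel movements.reverse PySem.Set.empty).map Prod.snd).reverse = sel movements := by
    rw [show (PySem.Set.empty : PySem.Set Int) = ([] : List Int) from rfl]
    exact A_eq_sel movements
  have hpred :
      (fun ix : Int × (((Int × Int) × (Int × Int)) × Int) =>
          (((PySem.List.enumerate movements 0).foldl
              (fun (d : PySem.Dict Int Int) ix => d.insert ix.2.2 ix.1)
              PySem.Dict.empty).getD ix.2.2 (-1) == ix.1))
        = (fun ix : Int × (((Int × Int) × (Int × Int)) × Int) =>
          ((lastIdx 0 movements ix.2.2).getD (-1) == ix.1)) := by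
    funext ix
    rw [PySem.Dict.getD_eq_get?_getD, dictB]
    simp [PySem.Dict.get?_empty]
  rw [List.nil_append, hpred, B_eq_sel movements 0, hA]
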